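-- pv_equiv track=rewrite | github.com/StatisticalReinforcementLearningLab/adaptive-sandwich | after_study_analysis.py | get_min_time_by_policy_num
-- ===== SOURCE A (Python) =====
-- def get_min_time_by_policy_num(
--     single_user_policy_num_by_decision_time, beta_index_by_policy_num
-- ):
--     """
--     Returns a dictionary mapping each policy number to the first time it was applicable,
--     and the first time after the first update.
--     """
--     min_time_by_policy_num = {}
--     first_time_after_first_update = None
--     for decision_time, policy_num in single_user_policy_num_by_decision_time.items():
--         if policy_num not in min_time_by_policy_num:
--             min_time_by_policy_num[policy_num] = decision_time
--
--         # Grab the first time where a non-initial, non-fallback policy is used.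
--         # Assumes single_user_policy_num_by_decision_time is sorted.
--         if (
--             policy_num in beta_index_by_policy_num
--             and first_time_after_first_update is None
--         ):
--             first_time_after_first_update = decision_time
--
--     return min_time_by_policy_num, first_time_after_first_update
-- ===== SOURCE B (Python) =====
-- def get_min_time_by_policy_num(
--     single_user_policy_num_by_decision_time, beta_index_by_policy_num
-- ):
--     items = list(single_user_policy_num_by_decision_time.items())
--     # first value per key (reverse overwrite keeps the forward-first value)
--     first_by_policy = {p: t for t, p in reversed(items)}
--     # keys in first-appearance order, each mapped to its first decision time
--     min_time_by_policy_num = {p: first_by_policy[p] for _, p in items}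
--     first_time_after_first_update = next(
--         (t for t, p in items if p in beta_index_by_policy_num), None
--     )
--     return min_time_by_policy_num, first_time_after_first_update
-- ===== Notes on version B (the rewrite author's own statement) =====
-- stated objective: idiomatic
-- what changed: Replaced A's single loop with two membership-guarded accumulators by three independent passes: a reverse-overwrite dict comprehension yielding each key's first value, a second comprehension fixing first-appearance key order, and a short-circuiting next() generator for the first applicable time.
import Mathlib
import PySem

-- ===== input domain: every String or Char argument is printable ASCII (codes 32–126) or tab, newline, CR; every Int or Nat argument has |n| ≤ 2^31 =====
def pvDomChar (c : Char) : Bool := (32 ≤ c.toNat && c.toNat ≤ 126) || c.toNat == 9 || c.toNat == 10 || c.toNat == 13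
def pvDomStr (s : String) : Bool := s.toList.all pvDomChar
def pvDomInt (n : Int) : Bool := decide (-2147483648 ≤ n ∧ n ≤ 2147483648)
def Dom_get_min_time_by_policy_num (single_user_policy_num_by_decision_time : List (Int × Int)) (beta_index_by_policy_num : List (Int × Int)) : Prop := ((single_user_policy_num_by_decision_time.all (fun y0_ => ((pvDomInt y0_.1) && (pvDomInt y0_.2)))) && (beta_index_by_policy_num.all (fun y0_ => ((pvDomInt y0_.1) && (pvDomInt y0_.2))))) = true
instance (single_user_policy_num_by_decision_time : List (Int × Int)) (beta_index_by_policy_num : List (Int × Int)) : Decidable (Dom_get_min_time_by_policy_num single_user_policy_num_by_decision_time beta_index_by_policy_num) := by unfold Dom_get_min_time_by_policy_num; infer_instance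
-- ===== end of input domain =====

-- B computes the same value by three independent idiomatic passes (reverse-overwrite dict,
-- order-fixing rebuild, short-circuiting find) instead of A's single guarded loop; return
-- values are proved equal on the whole domain.

-- ===== PORT A =====
def get_min_time_by_policy_num (single_user_policy_num_by_decision_time : List (Int × Int)) (beta_index_by_policy_num : List (Int × Int)) : (List (Int × Int)) × Option Int :=
  let bd := PySem.Dict.ofList beta_index_by_policy_num
  let st := single_user_policy_num_by_decision_time.foldl
    (fun (s : PySem.Dict Int Int × Option Int) tp =>
      (if s.1.contains tp.2 = false then s.1.insert tp.2 tp.1 else s.1,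
       if bd.contains tp.2 && s.2.isNone then some tp.1 else s.2))
    (PySem.Dict.empty, none)
  (st.1.items, st.2)

-- ===== PORT B =====
def get_min_time_by_policy_num_alt (single_user_policy_num_by_decision_time : List (Int × Int)) (beta_index_by_policy_num : List (Int × Int)) : (List (Int × Int)) × Option Int :=
  let bd := PySem.Dict.ofList beta_index_by_policy_num
  let firstBy := single_user_policy_num_by_decision_time.reverse.foldl
    (fun (d : PySem.Dict Int Int) tp => d.insert tp.2 tp.1) PySem.Dict.empty
  -- first_by_policy[p]: the key is always present, so getD's default is never used (exact)
  let minTime := single_user_policy_num_by_decision_time.foldl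
    (fun (d : PySem.Dict Int Int) tp => d.insert tp.2 (firstBy.getD tp.2 0)) PySem.Dict.empty
  (minTime.items,
   (single_user_policy_num_by_decision_time.find? (fun tp => bd.contains tp.2)).map (·.1))

-- ===== PRECONDITION & SPEC =====
def Spec_get_min_time_by_policy_num (single_user_policy_num_by_decision_time : List (Int × Int)) (beta_index_by_policy_num : List (Int × Int)) (out : (List (Int × Int)) × Option Int) : Prop := out = get_min_time_by_policy_num_alt single_user_policy_num_by_decision_time beta_index_by_policy_num
instance (single_user_policy_num_by_decision_time : List (Int × Int)) (beta_index_by_policy_num : List (Int × Int)) (out : (List (Int × Int)) × Option Int) : Decidable (Spec_get_min_time_by_policy_num single_user_policy_num_by_decision_time beta_index_by_policy_num out) := by unfold Spec_get_min_time_by_policy_num; infer_instance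

-- ===== CLAIM (what is proved, stated in full; the proofs are below) =====
def Claim_equal_get_min_time_by_policy_num : Prop := ∀ (single_user_policy_num_by_decision_time : List (Int × Int)) (beta_index_by_policy_num : List (Int × Int)), Dom_get_min_time_by_policy_num single_user_policy_num_by_decision_time beta_index_by_policy_num → Spec_get_min_time_by_policy_num single_user_policy_num_by_decision_time beta_index_by_policy_num (get_min_time_by_policy_num single_user_policy_num_by_decision_time beta_index_by_policy_num)

-- ===== LEMMAS AND PROOFS =====

-- Option accumulator: once set it stays set
lemma optfold_some (pred : Int × Int → Bool) (l : List (Int × Int)) (t : Int) :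
    l.foldl (fun o tp => if pred tp && o.isNone then some tp.1 else o) (some t) = some t := by
  induction l with
  | nil => rfl
  | cons x xs ih => simpa using ih

-- Option accumulator from none is the first match
lemma optfold_none (pred : Int × Int → Bool) (l : List (Int × Int)) :
    l.foldl (fun o tp => if pred tp && o.isNone then some tp.1 else o) none
      = (l.find? pred).map (·.1) := by
  induction l with
  | nil => rfl
  | cons x xs ih =>
    by_cases hx : pred x
    · rw [List.foldl_cons, List.find?_cons_of_pos hx]
      have hf : (if pred x && (none : Option Int).isNone then some x.1 else none) = some x.1 := by
        simp [hx]
      rw [hf]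
      exact optfold_some pred xs x.1
    · have hx' : pred x = false := by simpa using hx
      rw [List.foldl_cons, List.find?_cons_of_neg (by simp [hx'])]
      have hf : (if pred x && (none : Option Int).isNone then some x.1 else none) = none := by
        simp [hx']
      rw [hf]
      exact ih

-- reverse-overwrite fold: lookup is the first forward value for the key
lemma revfold_get? (l : List (Int × Int)) (d0 : PySem.Dict Int Int) (p : Int) :
    (l.reverse.foldl (fun d tp => d.insert tp.2 tp.1) d0).get? p
      = ((l.find? (fun tp => tp.2 == p)).map (·.1)).or (d0.get? p) := by
  rw [List.foldl_reverse]
  induction l with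
  | nil => rfl
  | cons x xs ih =>
    by_cases hx : x.2 = p
    · subst hx
      rw [List.foldr_cons, PySem.Dict.get?_insert_self, List.find?_cons_of_pos (by simp)]
      simp
    · rw [List.foldr_cons, PySem.Dict.get?_insert_of_ne _ _ (Ne.symm hx),
          List.find?_cons_of_neg (by simp [hx]), ih]

-- re-inserting the value a key already has is a no-op
lemma insert_self_of_get? (d : PySem.Dict Int Int) (k v : Int)
    (hn : d.keys.Nodup) (h : d.get? k = some v) : d.insert k v = d := by
  apply PySem.Dict.ext
  have hc : d.contains k = true := by
    rw [PySem.Dict.contains_eq_isSome_get?, h]; rfl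
  rw [PySem.Dict.items_insert_of_contains _ _ hc]
  conv_rhs => rw [← List.map_id d.items]
  apply List.map_congr_left
  intro a ha
  by_cases hak : a.1 = k
  · have hga : d.get? a.1 = some a.2 := PySem.Dict.get?_of_mem_items _ (by exact ha) hn
    rw [hak, h] at hga
    have hva : v = a.2 := Option.some_inj.mp hga
    rw [if_pos (by simp [hak])]
    rw [← hak, hva]
    rfl
  · simp [hak]

-- main dict-loop equality: A's insert-if-absent fold equals B's rebuild-from-F fold
lemma mainDict (F : PySem.Dict Int Int) :
    ∀ (l : List (Int × Int)) (d : PySem.Dict Int Int),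
    d.keys.Nodup →
    (∀ p v, d.get? p = some v → F.get? p = some v) →
    (∀ p, d.contains p = false → F.get? p = (l.find? (fun tp => tp.2 == p)).map (·.1)) →
    l.foldl (fun d tp => if d.contains tp.2 = false then d.insert tp.2 tp.1 else d) d
      = l.foldl (fun d tp => d.insert tp.2 (F.getD tp.2 0)) d := by
  intro l
  induction l with
  | nil => intro d _ _ _; rfl
  | cons x xs ih =>
    intro d hn h2 h
    obtain ⟨t, p⟩ := x
    simp only [List.foldl_cons]
    cases hcp : d.contains p with
    | false =>
      have hF : F.get? p = some t := by
        rw [h p hcp, List.find?_cons_of_pos (by simp)]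
        rfl
      have hgD : F.getD p 0 = t := by
        rw [PySem.Dict.getD_eq_get?_getD, hF]; rfl
      rw [if_pos rfl, hgD]
      apply ih
      · exact PySem.Dict.nodup_keys_insert _ _ _ hn
      · intro q v hq
        by_cases hqp : q = p
        · subst hqp; rw [PySem.Dict.get?_insert_self] at hq
          rw [hF, ← hq]
        · rw [PySem.Dict.get?_insert_of_ne _ _ hqp] at hq
          exact h2 q v hq
      · intro q hq
        rw [PySem.Dict.contains_insert] at hq
        simp only [Bool.or_eq_false_iff, beq_eq_false_iff_ne] at hq
        rw [h q hq.2, List.find?_cons_of_neg (by simp [Ne.symm hq.1])]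
    | true =>
      have hex : ∃ v, d.get? p = some v := by
        rw [PySem.Dict.contains_eq_isSome_get?] at hcp
        exact Option.isSome_iff_exists.mp hcp
      obtain ⟨v, hv⟩ := hex
      have hgD : F.getD p 0 = v := by
        rw [PySem.Dict.getD_eq_get?_getD, h2 p v hv]; rfl
      rw [if_neg (by simp), hgD, insert_self_of_get? d p v hn hv]
      apply ih d hn h2
      intro q hq
      have hqp : q ≠ p := by intro he; rw [he, hcp] at hq; cases hq
      rw [h q hq, List.find?_cons_of_neg (by simp [Ne.symm hqp])]

-- ===== VERDICT (by name: the statement is the Claim_ definition above) =====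
theorem get_min_time_by_policy_num_spec : Claim_equal_get_min_time_by_policy_num := by
  intro l beta _
  unfold Spec_get_min_time_by_policy_num get_min_time_by_policy_num get_min_time_by_policy_num_alt
  have hsplit := PySem.List.foldl_prod_mk
    (fun (d : PySem.Dict Int Int) (tp : Int × Int) =>
      if d.contains tp.2 = false then d.insert tp.2 tp.1 else d)
    (fun (o : Option Int) (tp : Int × Int) =>
      if (PySem.Dict.ofList beta).contains tp.2 && o.isNone then some tp.1 else o)
    l PySem.Dict.empty none
  beta_reduce at hsplit
  simp only [hsplit]
  rw [Prod.mk.injEq]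
  refine ⟨?_, ?_⟩
  · congr 1
    apply mainDict
    · exact PySem.Dict.nodup_keys_empty
    · intro p v hp
      rw [PySem.Dict.get?_empty] at hp
      cases hp
    · intro p _
      rw [revfold_get?, PySem.Dict.get?_empty, Option.or_none]
  · exact optfold_none _ l
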